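-- pv_equiv track=rewrite | github.com/Vidi-M/Cryptic-Crossword-Reverse-Dictionary | iteration/3(0.37 + 0.08)/main.py | write_info
-- ===== SOURCE A (Python) =====
-- def write_info(clue, answer, words):
--     page = 'wrong'
--     chars = len(answer)
--     for pos, word in enumerate(words):
--         word_lower = word.lower()
--         if word_lower == answer and page != 'right':
--             page = 'right'
--             printline = f"CLUE: {clue} ||| ANS: {answer} ||| POS: {pos+1} \n"
--
--         for i in range(len(word_lower) - chars + 1):
--             substring = word_lower[i:i+chars]  # Get a substring of the word with the same length as the answer
--             if substring == answer and page != 'almost' and page != 'right':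
--                 page = 'almost'
--                 printline = f"CLUE: {clue} ||| ANS: {answer} ||| POS: {pos+1} ||| Found in: {word} \n"
--
--     if page == 'wrong':
--         printline = f"CLUE: {clue} ||| ANS: {answer} \n {words} \n"
--
--     return page, printline
-- ===== SOURCE B (Python) =====
-- def write_info(clue, answer, words):
--     lowered = [w.lower() for w in words]
--     exact = next((i for i, w in enumerate(lowered) if w == answer), None)
--     sub = next((i for i, w in enumerate(lowered) if answer in w), None)
--     if exact is not None:
--         return 'right', f"CLUE: {clue} ||| ANS: {answer} ||| POS: {exact+1} \n"
--     if sub is not None: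
--         return 'almost', f"CLUE: {clue} ||| ANS: {answer} ||| POS: {sub+1} ||| Found in: {words[sub]} \n"
--     return 'wrong', f"CLUE: {clue} ||| ANS: {answer} \n {words} \n"
-- ===== Notes on version B (the rewrite author's own statement) =====
-- stated objective: simpler
-- what changed: Replaces A's in-loop three-state machine with incremental printline assembly (and its hand-rolled slice-by-slice substring scan) by two separate first-index searches over the lowercased words (exact match, then substring via 'in') followed by a single final message construction.
import Mathlib
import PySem

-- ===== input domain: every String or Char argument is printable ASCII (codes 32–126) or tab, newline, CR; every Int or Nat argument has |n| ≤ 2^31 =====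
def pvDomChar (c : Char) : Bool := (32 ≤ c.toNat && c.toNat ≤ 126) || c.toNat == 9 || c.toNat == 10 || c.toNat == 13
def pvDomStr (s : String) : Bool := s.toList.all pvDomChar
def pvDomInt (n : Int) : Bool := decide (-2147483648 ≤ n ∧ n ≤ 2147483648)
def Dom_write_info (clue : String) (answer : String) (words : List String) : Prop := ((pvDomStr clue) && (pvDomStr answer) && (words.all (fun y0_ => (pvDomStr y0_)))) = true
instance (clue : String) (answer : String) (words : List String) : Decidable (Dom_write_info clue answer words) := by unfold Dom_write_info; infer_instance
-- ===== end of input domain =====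

-- B replaces A's in-loop three-state machine (and its hand-rolled slice-by-slice substring scan)
-- by two explicit first-index searches followed by one final message construction: objective 'simpler'.

-- shared formatting helpers (the f-strings and the str(list) repr common to both Pythons; the repr is
-- exact on the printable-ASCII + tab/newline/CR domain, where Python escapes exactly \\, the quote, \t, \n, \r)
def pyReprChars (q : Char) (cs : List Char) : List Char :=
  cs.flatMap (fun c =>
    if c = '\\' then ['\\', '\\']
    else if c = q then ['\\', q]
    else if c = '\t' then ['\\', 't']
    else if c = '\n' then ['\\', 'n']
    else if c = '\r' then ['\\', 'r']
    else [c])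

def pyReprStr (s : String) : List Char :=
  let cs := s.toList
  let q : Char := if '\'' ∈ cs ∧ '"' ∉ cs then '"' else '\''
  q :: (pyReprChars q cs ++ [q])

def pyReprWords (ws : List String) : String :=
  String.ofList ('[' :: (List.intercalate [',', ' '] (ws.map pyReprStr) ++ [']']))

-- ===== PORT A =====
-- A's three f-strings
def aMsgRight (clue answer : String) (pos : Int) : String :=
  "CLUE: " ++ clue ++ " ||| ANS: " ++ answer ++ " ||| POS: " ++ PySem.Int.toStr (pos + 1) ++ " \n"

def aMsgAlmost (clue answer : String) (pos : Int) (word : String) : String :=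
  "CLUE: " ++ clue ++ " ||| ANS: " ++ answer ++ " ||| POS: " ++ PySem.Int.toStr (pos + 1)
    ++ " ||| Found in: " ++ word ++ " \n"

def aMsgWrong (clue answer : String) (words : List String) : String :=
  "CLUE: " ++ clue ++ " ||| ANS: " ++ answer ++ " \n " ++ pyReprWords words ++ " \n"

-- the body of A's inner 'for i in range(len(word_lower) - chars + 1)' loop
def aInner (clue answer : String) (chars pos : Int) (word word_lower : String)
    (st : String × String) (i : Int) : String × String :=
  let substring := PySem.Str.slice word_lower (some i) (some (i + chars))
  if substring = answer ∧ st.1 ≠ "almost" ∧ st.1 ≠ "right"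
  then ("almost", aMsgAlmost clue answer pos word)
  else st

-- the body of A's outer 'for pos, word in enumerate(words)' loop
def aOuter (clue answer : String) (chars : Int) (st : String × String)
    (pw : Int × String) : String × String :=
  let word_lower := PySem.Str.lower pw.2
  let st := if word_lower = answer ∧ st.1 ≠ "right"
            then ("right", aMsgRight clue answer pw.1)
            else st
  (PySem.List.pyRange 0 (PySem.Str.len word_lower - chars + 1) 1).foldl
    (aInner clue answer chars pw.1 pw.2 word_lower) st

def write_info (clue : String) (answer : String) (words : List String) : String × String :=
  let chars := PySem.Str.len answer
  let st := (PySem.List.enumerate words).foldl (aOuter clue answer chars) ("wrong", "")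
  if st.1 = "wrong" then ("wrong", aMsgWrong clue answer words) else st

-- ===== PORT B =====
-- B's three f-strings (textually the same in Source B as in A)
def bMsgRight (clue answer : String) (pos : Int) : String :=
  "CLUE: " ++ clue ++ " ||| ANS: " ++ answer ++ " ||| POS: " ++ PySem.Int.toStr (pos + 1) ++ " \n"

def bMsgAlmost (clue answer : String) (pos : Int) (word : String) : String :=
  "CLUE: " ++ clue ++ " ||| ANS: " ++ answer ++ " ||| POS: " ++ PySem.Int.toStr (pos + 1)
    ++ " ||| Found in: " ++ word ++ " \n"

def bMsgWrong (clue answer : String) (words : List String) : String :=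
  "CLUE: " ++ clue ++ " ||| ANS: " ++ answer ++ " \n " ++ pyReprWords words ++ " \n"

def write_info_alt (clue : String) (answer : String) (words : List String) : String × String :=
  let lowered := words.map PySem.Str.lower
  let exact := lowered.findIdx? (fun w => w == answer)
  let sub := lowered.findIdx? (fun w => PySem.Str.isIn answer w)
  match exact with
  | some i => ("right", bMsgRight clue answer (i : Int))
  | none =>
    match sub with
    | some i => ("almost", bMsgAlmost clue answer (i : Int) (words.getD i ""))
    | none => ("wrong", bMsgWrong clue answer words)

-- ===== PRECONDITION & SPEC =====
def Spec_write_info (clue : String) (answer : String) (words : List String) (out : String × String) : Prop := out = write_info_alt clue answer words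
instance (clue : String) (answer : String) (words : List String) (out : String × String) : Decidable (Spec_write_info clue answer words out) := by unfold Spec_write_info; infer_instance

-- ===== CLAIM (what is proved, stated in full; the proofs are below) =====
def Claim_equal_write_info : Prop := ∀ (clue : String) (answer : String) (words : List String), Dom_write_info clue answer words → Spec_write_info clue answer words (write_info clue answer words)

-- ===== LEMMAS AND PROOFS =====

-- the inner loop never changes an 'almost'/'right' state
theorem aInner_stay (clue answer : String) (chars pos : Int) (word wl : String)
    (l : List Int) (st : String × String) (h : st.1 = "almost" ∨ st.1 = "right") :
    l.foldl (aInner clue answer chars pos word wl) st = st := by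
  induction l with
  | nil => rfl
  | cons a l ih =>
    have hs : aInner clue answer chars pos word wl st a = st := by
      unfold aInner
      rcases h with h | h <;> simp [h]
    simp [List.foldl_cons, hs, ih]

-- characterisation of the inner loop
theorem aInner_result (clue answer : String) (chars pos : Int) (word wl : String)
    (l : List Int) (st : String × String) :
    l.foldl (aInner clue answer chars pos word wl) st =
      if st.1 ≠ "almost" ∧ st.1 ≠ "right" ∧
         (∃ i ∈ l, PySem.Str.slice wl (some i) (some (i + chars)) = answer)
      then ("almost", aMsgAlmost clue answer pos word)
      else st := by
  induction l generalizing st with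
  | nil => simp
  | cons a l ih =>
    by_cases h1 : st.1 = "almost" ∨ st.1 = "right"
    · rw [aInner_stay clue answer chars pos word wl (a :: l) st h1, if_neg]
      rcases h1 with h | h <;> simp [h]
    · rw [not_or] at h1
      by_cases h2 : PySem.Str.slice wl (some a) (some (a + chars)) = answer
      · have hstep : aInner clue answer chars pos word wl st a =
            ("almost", aMsgAlmost clue answer pos word) := by
          unfold aInner; simp [h1.1, h1.2, h2]
        rw [List.foldl_cons, hstep,
          aInner_stay clue answer chars pos word wl l _ (Or.inl rfl),
          if_pos ⟨h1.1, h1.2, a, List.mem_cons_self, h2⟩]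
      · have hstep : aInner clue answer chars pos word wl st a = st := by
          unfold aInner; simp [h2]
        rw [List.foldl_cons, hstep, ih st]
        by_cases h3 : ∃ i ∈ l, PySem.Str.slice wl (some i) (some (i + chars)) = answer
        · obtain ⟨i, hi, he⟩ := h3
          rw [if_pos ⟨h1.1, h1.2, i, hi, he⟩,
            if_pos ⟨h1.1, h1.2, i, List.mem_cons_of_mem a hi, he⟩]
        · rw [if_neg (by rintro ⟨-, -, i, hi, he⟩; exact h3 ⟨i, hi, he⟩), if_neg]
          rintro ⟨-, -, i, hi, he⟩
          rw [List.mem_cons] at hi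
          rcases hi with rfl | hi
          · exact h2 he
          · exact h3 ⟨i, hi, he⟩

-- the slice scan of A finds the answer iff 'answer in word_lower' (B's test)
theorem exists_slice_iff_isIn (answer wl : String) :
    (∃ i ∈ PySem.List.pyRange 0 (PySem.Str.len wl - PySem.Str.len answer + 1) 1,
        PySem.Str.slice wl (some i) (some (i + PySem.Str.len answer)) = answer) ↔
    PySem.Str.isIn answer wl = true := by
  rw [PySem.Str.isIn_iff_infix]
  constructor
  · rintro ⟨i, hi, he⟩
    rw [PySem.List.mem_pyRange_one] at hi
    obtain ⟨k, rfl⟩ : ∃ k : Nat, i = (k : Int) := ⟨i.toNat, (Int.toNat_of_nonneg hi.1).symm⟩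
    have hlist : (PySem.Str.slice wl (some (k : Int))
        (some ((k : Int) + PySem.Str.len answer))).toList = answer.toList := by rw [he]
    rw [show (PySem.Str.slice wl (some (k : Int)) (some ((k : Int) + PySem.Str.len answer))).toList
          = PySem.List.slice wl.toList (some (k : Int)) (some ((k : Int) + PySem.Str.len answer))
        from by simp [PySem.Str.slice],
      PySem.Str.len_eq, PySem.List.slice_natCast_add] at hlist
    have h1 : answer.toList <+: wl.toList.drop k := hlist ▸ List.take_prefix _ _
    exact h1.isInfix.trans (List.drop_suffix k wl.toList).isInfix
  · rintro ⟨s, t, hst⟩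
    refine ⟨(s.length : Int), ?_, ?_⟩
    · rw [PySem.List.mem_pyRange_one]
      refine ⟨Int.natCast_nonneg _, ?_⟩
      have hlen : wl.toList.length = s.length + answer.toList.length + t.length := by
        rw [← hst]; simp; omega
      simp only [PySem.Str.len_eq]
      omega
    · have h2 : (PySem.Str.slice wl (some (s.length : Int))
          (some ((s.length : Int) + PySem.Str.len answer))).toList = answer.toList := by
        rw [show (PySem.Str.slice wl (some (s.length : Int))
              (some ((s.length : Int) + PySem.Str.len answer))).toList
            = PySem.List.slice wl.toList (some (s.length : Int))
                (some ((s.length : Int) + PySem.Str.len answer))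
            from by simp [PySem.Str.slice],
          PySem.Str.len_eq, PySem.List.slice_natCast_add, ← hst,
          List.append_assoc, List.drop_left, List.take_left]
      have h3 := congrArg String.ofList h2
      simpa using h3

-- folding the outer body from a 'right' state changes nothing
theorem aOuter_stay (clue answer : String) (chars : Int) (l : List (Int × String))
    (st : String × String) (h : st.1 = "right") :
    l.foldl (aOuter clue answer chars) st = st := by
  induction l with
  | nil => rfl
  | cons a l ih =>
    have hs : aOuter clue answer chars st a = st := by
      unfold aOuter
      dsimp only
      rw [if_neg (by simp [h])]
      exact aInner_stay _ _ _ _ _ _ _ st (Or.inr h)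
    simp [List.foldl_cons, hs, ih]

-- characterisation of A's outer loop from any non-'right' state
theorem aOuter_result (clue answer : String) (ws : List String) :
    ∀ (k : Int) (st : String × String), st.1 ≠ "right" →
    (PySem.List.enumerate ws k).foldl (aOuter clue answer (PySem.Str.len answer)) st =
      match (ws.map PySem.Str.lower).findIdx? (fun w => w == answer) with
      | some j => ("right", aMsgRight clue answer (k + j))
      | none =>
        if st.1 = "almost" then st
        else
          match (ws.map PySem.Str.lower).findIdx? (fun w => PySem.Str.isIn answer w) with
          | some j => ("almost", aMsgAlmost clue answer (k + j) (ws.getD j ""))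
          | none => st := by
  induction ws with
  | nil =>
    intro k st h
    rw [PySem.List.enumerate_nil]
    simp only [List.foldl_nil, List.map_nil, List.findIdx?_nil]
    split_ifs <;> rfl
  | cons w ws ih =>
    intro k st h
    rw [PySem.List.enumerate_cons, List.foldl_cons]
    by_cases hw : PySem.Str.lower w = answer
    · have hstep : aOuter clue answer (PySem.Str.len answer) st (k, w) =
          ("right", aMsgRight clue answer k) := by
        unfold aOuter
        dsimp only
        rw [if_pos ⟨hw, h⟩]
        exact aInner_stay _ _ _ _ _ _ _ _ (Or.inr rfl)
      rw [hstep, aOuter_stay _ _ _ _ _ rfl]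
      simp [List.findIdx?_cons, hw]
    · have hbeq : ((PySem.Str.lower w) == answer) = false := by simpa using hw
      have hinner := aInner_result clue answer (PySem.Str.len answer) k w
        (PySem.Str.lower w)
        (PySem.List.pyRange 0 (PySem.Str.len (PySem.Str.lower w) - PySem.Str.len answer + 1) 1)
        st
      by_cases ha : st.1 = "almost"
      · have hstep : aOuter clue answer (PySem.Str.len answer) st (k, w) = st := by
          unfold aOuter
          dsimp only
          rw [if_neg (by simp [hw])]
          exact aInner_stay _ _ _ _ _ _ _ st (Or.inl ha)
        rw [hstep, ih (k + 1) st h]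
        simp only [List.map_cons, List.findIdx?_cons, hbeq, Bool.false_eq_true, if_false]
        cases hE : (ws.map PySem.Str.lower).findIdx? (fun w => w == answer) with
        | some j =>
          simp only [Option.map_some]
          push_cast
          ring_nf
        | none => simp [ha]
      · have hstep : aOuter clue answer (PySem.Str.len answer) st (k, w) =
            (if PySem.Str.isIn answer (PySem.Str.lower w) = true
             then ("almost", aMsgAlmost clue answer k w) else st) := by
          unfold aOuter
          dsimp only
          rw [if_neg (by simp [hw]), hinner]
          by_cases hin : PySem.Str.isIn answer (PySem.Str.lower w) = true
          · rw [if_pos hin, if_pos ⟨ha, h, (exists_slice_iff_isIn answer _).mpr hin⟩]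
          · rw [if_neg hin, if_neg]
            rintro ⟨-, -, hex⟩
            exact hin ((exists_slice_iff_isIn answer _).mp hex)
        by_cases hin : PySem.Str.isIn answer (PySem.Str.lower w) = true
        · rw [hstep, if_pos hin, ih (k + 1) _ (by simp)]
          simp only [List.map_cons, List.findIdx?_cons, hbeq, Bool.false_eq_true, if_false,
            hin, if_true]
          cases hE : (ws.map PySem.Str.lower).findIdx? (fun w => w == answer) with
          | some j =>
            simp only [Option.map_some]
            push_cast
            ring_nf
          | none => simp [ha]
        · have hinb : PySem.Str.isIn answer (PySem.Str.lower w) = false := by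
            cases hb : PySem.Str.isIn answer (PySem.Str.lower w) with
            | false => rfl
            | true => exact absurd hb hin
          rw [hstep, if_neg hin, ih (k + 1) st h]
          simp only [List.map_cons, List.findIdx?_cons, hbeq, hinb, Bool.false_eq_true, if_false]
          cases hE : (ws.map PySem.Str.lower).findIdx? (fun w => w == answer) with
          | some j =>
            simp only [Option.map_some]
            push_cast
            ring_nf
          | none =>
            simp only [Option.map_none]
            rw [if_neg ha, if_neg ha]
            cases hS : (ws.map PySem.Str.lower).findIdx? (fun w => PySem.Str.isIn answer w) with
            | some j =>
              simp only [Option.map_some, List.getD_cons_succ]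
              push_cast
              ring_nf
            | none => simp

-- ===== VERDICT (by name: the statement is the Claim_ definition above) =====
theorem write_info_spec : Claim_equal_write_info := by
  intro clue answer words _
  unfold Spec_write_info write_info write_info_alt
  dsimp only
  rw [aOuter_result clue answer words 0 ("wrong", "") (by decide)]
  cases hE : (words.map PySem.Str.lower).findIdx? (fun w => w == answer) with
  | some j => simp [aMsgRight, bMsgRight]
  | none =>
    cases hS : (words.map PySem.Str.lower).findIdx? (fun w => PySem.Str.isIn answer w) with
    | some j => simp [aMsgAlmost, bMsgAlmost]
    | none => simp [aMsgWrong, bMsgWrong]
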